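-- pv_equiv track=rewrite | github.com/VikParuchuri/surya | surya/tables.py | sort_bboxes
-- ===== SOURCE A (Python) =====
-- def sort_bboxes(bboxes, tolerance=1):
--     vertical_groups = {}
--     for block in bboxes:
--         group_key = round(block[1] / tolerance) * tolerance
--         if group_key not in vertical_groups:
--             vertical_groups[group_key] = []
--         vertical_groups[group_key].append(block)
--
--     # Sort each group horizontally and flatten the groups into a single list
--     sorted_page_blocks = []
--     for _, group in sorted(vertical_groups.items()):
--         sorted_group = sorted(group, key=lambda x: x[0])
--         sorted_page_blocks.extend(sorted_group)
--
--     return sorted_page_blocks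
-- ===== SOURCE B (Python) =====
-- def sort_bboxes(bboxes, tolerance=1):
--     # Single-pass stable insertion into a sorted accumulator under the composite
--     # key (rounded vertical position, x[0]); no grouping dict, no staged sorts.
--     out = []
--     for b in bboxes:
--         kb = (round(b[1] / tolerance) * tolerance, b[0])
--         i = 0
--         while i < len(out) and (round(out[i][1] / tolerance) * tolerance, out[i][0]) <= kb:
--             i += 1
--         out.insert(i, b)
--     return out
-- ===== Notes on version B (the rewrite author's own statement) =====
-- stated objective: alternative
-- what changed: The group-by dict plus per-group sorts and flattening is replaced by a single pass that inserts each bbox into a sorted accumulator under the composite key (rounded vertical position, x[0]), placing it after all boxes with key <= its key so ties keep input order.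
import Mathlib
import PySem

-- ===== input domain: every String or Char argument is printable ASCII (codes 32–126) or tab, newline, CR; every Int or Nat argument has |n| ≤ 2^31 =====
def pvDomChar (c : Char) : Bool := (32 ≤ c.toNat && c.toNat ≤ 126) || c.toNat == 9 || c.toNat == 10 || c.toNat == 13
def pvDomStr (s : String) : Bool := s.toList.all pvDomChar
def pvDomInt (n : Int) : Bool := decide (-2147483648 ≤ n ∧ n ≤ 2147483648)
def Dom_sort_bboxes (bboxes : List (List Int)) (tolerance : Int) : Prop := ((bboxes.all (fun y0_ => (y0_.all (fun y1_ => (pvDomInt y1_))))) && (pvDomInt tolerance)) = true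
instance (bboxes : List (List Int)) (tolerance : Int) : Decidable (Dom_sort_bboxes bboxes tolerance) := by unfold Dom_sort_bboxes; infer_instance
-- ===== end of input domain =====

-- B replaces A's group-by dict + per-group sorts + flatten by a single pass that inserts each
-- bbox into a sorted accumulator under the composite key (rounded vertical, x[0]); objective:
-- alternative (different algorithm, not faster).

-- ===== PORT A =====
-- round(a / t) for integers a, t (t ≠ 0 under Pre_): banker's rounding of the exact rational a/t.
-- Exact for the domain |a|,|t| ≤ 2^31: there the float a/t never crosses a half-integer boundary,
-- so Python's round of the float equals round-half-even of the rational.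
def pyRoundDiv (a t : Int) : Int :=
  let n := if t < 0 then -a else a
  let d := if t < 0 then -t else t
  let q := PySem.Int.floordiv n d
  let r := n - q * d
  if 2 * r < d then q else if d < 2 * r then q + 1
  else if PySem.Int.mod q 2 = 0 then q else q + 1

-- group_key = round(block[1] / tolerance) * tolerance  (the same expression appears verbatim
-- in both Python sources)
def gkey (block : List Int) (tolerance : Int) : Int :=
  pyRoundDiv (PySem.List.pyGetD block 1 0) tolerance * tolerance

-- the body of A's first loop: setdefault-style insert then append
def sb_group (d : PySem.Dict Int (List (List Int))) (tolerance : Int) (block : List Int) :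
    PySem.Dict Int (List (List Int)) :=
  let group_key := gkey block tolerance
  let d := if d.contains group_key then d else d.insert group_key []
  d.insert group_key (d.getD group_key [] ++ [block])

def sort_bboxes (bboxes : List (List Int)) (tolerance : Int) : List (List Int) :=
  let vertical_groups := bboxes.foldl (fun d block => sb_group d tolerance block) PySem.Dict.empty
  -- sorted(vertical_groups.items()): keys are distinct ints, so tuple comparison = key comparison
  (PySem.List.sorted vertical_groups.items (fun p => p.1) false).foldl
    (fun acc p => acc ++ PySem.List.sorted p.2 (fun x => PySem.List.pyGetD x 0 0) false) []

-- ===== PORT B =====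
-- the composite key (round(b[1]/tolerance)*tolerance, b[0]) computed in Source B's loop
def keyB (b : List Int) (tolerance : Int) : Int × Int :=
  (gkey b tolerance, PySem.List.pyGetD b 0 0)

-- Python tuple comparison `<=` on the two-int key
def lexLe (p q : Int × Int) : Bool :=
  decide (p.1 < q.1) || (decide (p.1 = q.1) && decide (p.2 ≤ q.2))

-- Source B's inner while loop + list.insert: walk past every element whose key is <= kb,
-- put x there (stable: x goes after equal keys)
def insB (tolerance : Int) (x : List Int) : List (List Int) → List (List Int)
  | [] => [x]
  | y :: ys =>
      if lexLe (keyB y tolerance) (keyB x tolerance) then y :: insB tolerance x ys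
      else x :: y :: ys

def sort_bboxes_alt (bboxes : List (List Int)) (tolerance : Int) : List (List Int) :=
  bboxes.foldl (fun out b => insB tolerance b out) []

-- ===== PRECONDITION & SPEC =====
-- Pre_ excludes exactly where Python A raises: tolerance = 0 with a nonempty list
-- (ZeroDivisionError) and a bbox with fewer than 2 entries (IndexError on block[1]).
def Pre_sort_bboxes (bboxes : List (List Int)) (tolerance : Int) : Prop :=
  (bboxes = [] ∨ tolerance ≠ 0) ∧ ∀ b ∈ bboxes, 2 ≤ b.length
instance (bboxes : List (List Int)) (tolerance : Int) : Decidable (Pre_sort_bboxes bboxes tolerance) := by unfold Pre_sort_bboxes; infer_instance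
def pvWitness_sort_bboxes : List (List Int) × Int := ([[3, 4, 7, 8], [1, 2, 5, 6], [0, 2, 3, 4]], 2)

def Spec_sort_bboxes (bboxes : List (List Int)) (tolerance : Int) (out : List (List Int)) : Prop := out = sort_bboxes_alt bboxes tolerance
instance (bboxes : List (List Int)) (tolerance : Int) (out : List (List Int)) : Decidable (Spec_sort_bboxes bboxes tolerance out) := by unfold Spec_sort_bboxes; infer_instance

-- ===== CLAIM (what is proved, stated in full; the proofs are below) =====
def Claim_equal_sort_bboxes : Prop := ∀ (bboxes : List (List Int)) (tolerance : Int), Dom_sort_bboxes bboxes tolerance → Pre_sort_bboxes bboxes tolerance → Spec_sort_bboxes bboxes tolerance (sort_bboxes bboxes tolerance)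

-- ===== LEMMAS AND PROOFS =====

-- B's insertion as strict-less "insert before the first strictly greater element"
def ltB (t : Int) (a b : List Int) : Bool := !lexLe (keyB b t) (keyB a t)

theorem insB_eq_insertBy (t : Int) (x : List Int) (l : List (List Int)) :
    insB t x l = PySem.List.insertBy (ltB t) x l := by
  induction l with
  | nil => rfl
  | cons y ys ih =>
      by_cases h : lexLe (keyB y t) (keyB x t) = true
      · simp [insB, PySem.List.insertBy, ltB, h, ih]
      · simp [insB, PySem.List.insertBy, ltB, h]

theorem alt_eq_foldl (bboxes : List (List Int)) (t : Int) :
    sort_bboxes_alt bboxes t =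
      bboxes.foldl (fun acc x => PySem.List.insertBy (ltB t) x acc) [] := by
  unfold sort_bboxes_alt
  induction bboxes using List.reverseRecOn with
  | nil => rfl
  | append_singleton xs x ih =>
      rw [List.foldl_append, List.foldl_append, List.foldl_cons, List.foldl_nil,
        List.foldl_cons, List.foldl_nil, ih, insB_eq_insertBy]

theorem ltB_of_lt {t : Int} {x y : List Int} (h : gkey x t < gkey y t) : ltB t x y = true := by
  simp only [ltB, lexLe, keyB, Bool.not_eq_true']
  simp only [Bool.or_eq_false_iff, Bool.and_eq_false_iff, decide_eq_false_iff_not]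
  constructor
  · omega
  · left; omega

theorem ltB_of_gt {t : Int} {x y : List Int} (h : gkey y t < gkey x t) : ltB t x y = false := by
  simp only [ltB, lexLe, keyB, Bool.not_eq_false']
  simp [h]

theorem ltB_of_eq {t : Int} {x y : List Int} (h : gkey y t = gkey x t) :
    ltB t x y = decide (PySem.List.pyGetD x 0 0 < PySem.List.pyGetD y 0 0) := by
  simp only [ltB, lexLe, keyB, h]
  by_cases h2 : PySem.List.pyGetD x 0 0 < PySem.List.pyGetD y 0 0
  · simp only [h2, decide_true]
    simp only [Bool.not_eq_true', Bool.or_eq_false_iff, Bool.and_eq_false_iff,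
      decide_eq_false_iff_not]
    exact ⟨by omega, Or.inr (by omega)⟩
  · simp only [h2, decide_false, Bool.not_eq_false', Bool.or_eq_true, Bool.and_eq_true,
      decide_eq_true_iff]
    exact Or.inr ⟨by simp, by omega⟩

theorem insertBy_front {α : Type} (b : α → α → Bool) (x : α) (l : List α)
    (h : ∀ y ∈ l, b x y = true) : PySem.List.insertBy b x l = x :: l := by
  cases l with
  | nil => simp [PySem.List.insertBy]
  | cons y ys => simp [PySem.List.insertBy, h y (by simp)]

theorem insertBy_append_left {α : Type} (b : α → α → Bool) (x : α) (pre l : List α)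
    (h : ∀ y ∈ pre, b x y = false) :
    PySem.List.insertBy b x (pre ++ l) = pre ++ PySem.List.insertBy b x l := by
  induction pre with
  | nil => simp
  | cons y ys ih =>
      simp [PySem.List.insertBy, h y (by simp)]
      exact ih (fun z hz => h z (by simp [hz]))

theorem insertBy_append_mid {α : Type} (b b' : α → α → Bool) (x : α) (m s : List α)
    (hm : ∀ y ∈ m, b x y = b' x y) (hs : ∀ y ∈ s, b x y = true) :
    PySem.List.insertBy b x (m ++ s) = PySem.List.insertBy b' x m ++ s := by
  induction m with
  | nil => simp [PySem.List.insertBy, insertBy_front b x s hs]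
  | cons y ys ih =>
      have hy := hm y (by simp)
      by_cases hb : b' x y = true
      · simp [PySem.List.insertBy, hy, hb]
      · have hb' : b' x y = false := by simpa using hb
        simp [PySem.List.insertBy, hy, hb']
        exact ih (fun z hz => hm z (by simp [hz]))

theorem insertBy_map {α β : Type} (f : α → β) (b : β → β → Bool) (b' : α → α → Bool)
    (hf : ∀ a c, b (f a) (f c) = b' a c) (x : α) (l : List α) :
    PySem.List.insertBy b (f x) (l.map f) = (PySem.List.insertBy b' x l).map f := by
  induction l with
  | nil => simp [PySem.List.insertBy]
  | cons y ys ih =>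
      by_cases hb : b' x y = true
      · simp [PySem.List.insertBy, hf x y, hb]
      · have hb' : b' x y = false := by simpa using hb
        simp [PySem.List.insertBy, hf x y, hb', ih]

theorem sorted_map_key_preserving {α β κ : Type} [LinearOrder κ] (f : α → β)
    (key : β → κ) (key' : α → κ) (hf : ∀ a, key (f a) = key' a) (l : List α) :
    PySem.List.sorted (l.map f) key false = (PySem.List.sorted l key' false).map f := by
  rw [PySem.List.sorted_eq_foldl_insertBy, PySem.List.sorted_eq_foldl_insertBy, List.foldl_map]
  suffices h : ∀ (l : List α) (acc : List α),
      l.foldl (fun a x => PySem.List.insertBy (fun a b => decide (key a < key b)) (f x) a) (acc.map f)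
        = (l.foldl (fun a x => PySem.List.insertBy (fun a b => decide (key' a < key' b)) x a) acc).map f by
    simpa using h l []
  intro l
  induction l with
  | nil => intro acc; simp
  | cons y ys ih =>
      intro acc
      rw [List.foldl_cons, List.foldl_cons,
        insertBy_map f (fun a b => decide (key a < key b)) (fun a b => decide (key' a < key' b))
          (fun a c => by simp [hf]) y acc, ih]

theorem sorted_append_singleton {α κ : Type} [LinearOrder κ] (l : List α) (x : α) (key : α → κ) :
    PySem.List.sorted (l ++ [x]) key false =
      PySem.List.insertBy (fun a b => decide (key a < key b)) x (PySem.List.sorted l key false) := by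
  rw [PySem.List.sorted_eq_foldl_insertBy, PySem.List.sorted_eq_foldl_insertBy, List.foldl_append]
  rfl

-- strictly increasing keys in sorted items (keys are Nodup)
theorem sorted_items_pairwise_lt {β : Type} (l : List (Int × β))
    (h : (l.map Prod.fst).Nodup) :
    (PySem.List.sorted l (fun p => p.1) false).Pairwise (fun a b => a.1 < b.1) := by
  have hle := PySem.List.sorted_pairwise l (fun p => p.1)
  have hperm : ((PySem.List.sorted l (fun p => p.1) false).map Prod.fst).Perm (l.map Prod.fst) :=
    (PySem.List.sorted_perm l (fun p => p.1) false).map Prod.fst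
  have hnd : ((PySem.List.sorted l (fun p => p.1) false).map Prod.fst).Nodup := h.perm hperm.symm
  have hne : (PySem.List.sorted l (fun p => p.1) false).Pairwise (fun a b => a.1 ≠ b.1) :=
    (List.pairwise_map).1 hnd
  exact (hle.and hne).imp (fun h => lt_of_le_of_ne h.1 h.2)

-- the dictionary invariant of A's first loop
def InvD (d : PySem.Dict Int (List (List Int))) (t : Int) : Prop :=
  d.keys.Nodup ∧ ∀ p ∈ d.items, ∀ b ∈ p.2, gkey b t = p.1

theorem invD_step (d : PySem.Dict Int (List (List Int))) (t : Int) (x : List Int)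
    (h : InvD d t) : InvD (sb_group d t x) t := by
  obtain ⟨hnd, hitems⟩ := h
  unfold sb_group
  by_cases hc : d.contains (gkey x t) = true
  · simp only [hc, if_true]
    refine ⟨PySem.Dict.nodup_keys_insert d _ _ hnd, ?_⟩
    intro p hp b hb
    rcases (PySem.Dict.mem_items_insert _ _ _ _).1 hp with hpk | ⟨hpd, _⟩
    · subst hpk
      simp only at hb
      rcases List.mem_append.1 hb with hb' | hb'
      · have hsome : (d.get? (gkey x t)).isSome := by
          rw [← PySem.Dict.contains_eq_isSome_get?]; exact hc
        obtain ⟨v, hv⟩ := Option.isSome_iff_exists.1 hsome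
        have hmem := PySem.Dict.mem_items_of_get?_eq_some d hv
        have hbv : b ∈ v := by rwa [PySem.Dict.getD_of_get?_eq_some d [] hv] at hb'
        exact hitems _ hmem b hbv
      · simp at hb'; subst hb'; rfl
    · exact hitems p hpd b hb
  · have hc' : d.contains (gkey x t) = false := by simpa using hc
    simp only [hc', Bool.false_eq_true, if_false]
    rw [PySem.Dict.getD_insert_self, PySem.Dict.insert_insert_self]
    refine ⟨PySem.Dict.nodup_keys_insert d _ _ hnd, ?_⟩
    intro p hp b hb
    rcases (PySem.Dict.mem_items_insert _ _ _ _).1 hp with hpk | ⟨hpd, _⟩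
    · subst hpk; simp only [List.nil_append] at hb; simp at hb; subst hb; rfl
    · exact hitems p hpd b hb

theorem invD_fold (bboxes : List (List Int)) (t : Int) :
    InvD (bboxes.foldl (fun d block => sb_group d t block) PySem.Dict.empty) t := by
  suffices h : ∀ (l : List (List Int)) (d : PySem.Dict Int (List (List Int))), InvD d t →
      InvD (l.foldl (fun d block => sb_group d t block) d) t by
    refine h bboxes PySem.Dict.empty ⟨PySem.Dict.nodup_keys_empty, ?_⟩
    intro p hp; simp [PySem.Dict.empty] at hp
  intro l
  induction l with
  | nil => intro d hd; simpa using hd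
  | cons y ys ih => intro d hd; exact ih _ (invD_step d t y hd)

-- A's flatten of the sorted items, as a flatMap
def flatG (si : List (Int × List (List Int))) : List (List Int) :=
  si.flatMap (fun p => PySem.List.sorted p.2 (fun x => PySem.List.pyGetD x 0 0) false)

theorem sorted_singleton {α κ : Type} [LT κ] [DecidableLT κ] (x : α) (key : α → κ) :
    PySem.List.sorted [x] key false = [x] := rfl

-- inserting a FRESH group (k, [x]) into the sorted items, then flattening,
-- is inserting x into the flattened list
theorem flat_insert_fresh (t : Int) (x : List Int) (si : List (Int × List (List Int)))
    (hpw : si.Pairwise (fun a b => a.1 < b.1))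
    (hkey : ∀ p ∈ si, ∀ b ∈ p.2, gkey b t = p.1)
    (hfresh : ∀ p ∈ si, p.1 ≠ gkey x t) :
    flatG (PySem.List.insertBy (fun a b => decide (a.1 < b.1)) (gkey x t, [x]) si)
      = PySem.List.insertBy (ltB t) x (flatG si) := by
  induction si with
  | nil => simp [flatG, PySem.List.insertBy, sorted_singleton]
  | cons p rest ih =>
      have hpx : p.1 ≠ gkey x t := hfresh p (by simp)
      have hall : ∀ q ∈ rest, p.1 < q.1 := (List.pairwise_cons.1 hpw).1
      by_cases hlt : gkey x t < p.1
      · have hfront : ∀ y ∈ flatG (p :: rest), ltB t x y = true := by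
          intro y hy
          simp only [flatG, List.flatMap_cons, List.mem_append] at hy
          rcases hy with hy | hy
          · have hk := hkey p (by simp) y ((PySem.List.mem_sorted _ _ _ _).1 hy)
            exact ltB_of_lt (by rw [hk]; exact hlt)
          · obtain ⟨q, hq, hyq⟩ := List.mem_flatMap.1 hy
            have hk := hkey q (by simp [hq]) y ((PySem.List.mem_sorted _ _ _ _).1 hyq)
            exact ltB_of_lt (by rw [hk]; exact lt_trans hlt (hall q hq))
        rw [insertBy_front _ _ _ hfront]
        simp [flatG, PySem.List.insertBy, hlt, sorted_singleton]
      · have hgt : p.1 < gkey x t := lt_of_le_of_ne (not_lt.1 hlt) hpx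
        have hskip : ∀ y ∈ PySem.List.sorted p.2 (fun x => PySem.List.pyGetD x 0 0) false,
            ltB t x y = false := by
          intro y hy
          have hk := hkey p (by simp) y ((PySem.List.mem_sorted _ _ _ _).1 hy)
          exact ltB_of_gt (by rw [hk]; exact hgt)
        have hrec := ih (List.pairwise_cons.1 hpw).2
          (fun q hq => hkey q (by simp [hq])) (fun q hq => hfresh q (by simp [hq]))
        simp only [flatG, List.flatMap_cons] at hrec ⊢
        rw [insertBy_append_left _ _ _ _ hskip, ← hrec]
        simp [PySem.List.insertBy, asymm hgt]

-- appending x to the (unique) existing group with key gkey x t, then flattening,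
-- is inserting x into the flattened list
theorem flat_insert_existing (t : Int) (x : List Int) (g : List (List Int))
    (si : List (Int × List (List Int)))
    (hpw : si.Pairwise (fun a b => a.1 < b.1))
    (hkey : ∀ p ∈ si, ∀ b ∈ p.2, gkey b t = p.1)
    (hg : ∀ p ∈ si, p.1 = gkey x t → p.2 = g)
    (hmem : gkey x t ∈ si.map Prod.fst) :
    flatG (si.map (fun p => if (p.1 == gkey x t) = true then (gkey x t, g ++ [x]) else p))
      = PySem.List.insertBy (ltB t) x (flatG si) := by
  induction si with
  | nil => simp at hmem
  | cons p rest ih =>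
      have hall : ∀ q ∈ rest, p.1 < q.1 := (List.pairwise_cons.1 hpw).1
      by_cases hpk : p.1 = gkey x t
      · have hrest_ne : ∀ q ∈ rest, q.1 ≠ gkey x t := by
          intro q hq; rw [← hpk]; exact ne_of_gt (hall q hq)
        have hrest_id : rest.map (fun p => if (p.1 == gkey x t) = true then (gkey x t, g ++ [x]) else p) = rest := by
          rw [List.map_congr_left (g := id) (fun q hq => by simp [hrest_ne q hq]), List.map_id]
        have hpg : p.2 = g := hg p (by simp) hpk
        have hmid : ∀ y ∈ PySem.List.sorted g (fun x => PySem.List.pyGetD x 0 0) false,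
            ltB t x y = decide (PySem.List.pyGetD x 0 0 < PySem.List.pyGetD y 0 0) := by
          intro y hy
          have hk := hkey p (by simp) y (by rw [hpg]; exact (PySem.List.mem_sorted _ _ _ _).1 hy)
          exact ltB_of_eq (by rw [hk, hpk])
        have hsuf : ∀ y ∈ flatG rest, ltB t x y = true := by
          intro y hy
          obtain ⟨q, hq, hyq⟩ := List.mem_flatMap.1 hy
          have hk := hkey q (by simp [hq]) y ((PySem.List.mem_sorted _ _ _ _).1 hyq)
          exact ltB_of_lt (by rw [hk, ← hpk]; exact hall q hq)
        simp only [flatG] at hsuf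
        simp only [List.map_cons, flatG, List.flatMap_cons, hrest_id, if_pos (beq_iff_eq.2 hpk), hpg]
        rw [sorted_append_singleton,
          insertBy_append_mid (ltB t) (fun a b => decide (PySem.List.pyGetD a 0 0 < PySem.List.pyGetD b 0 0)) x _ _ hmid hsuf]
      · have hmem' : gkey x t ∈ rest.map Prod.fst := by
          rcases List.mem_cons.1 hmem with h | h
          · exact absurd h.symm (by simpa using hpk)
          · exact h
        obtain ⟨q0, hq0, hq0k⟩ := List.mem_map.1 hmem'
        have hplt : p.1 < gkey x t := by rw [← hq0k]; exact hall q0 hq0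
        have hskip : ∀ y ∈ PySem.List.sorted p.2 (fun x => PySem.List.pyGetD x 0 0) false,
            ltB t x y = false := by
          intro y hy
          have hk := hkey p (by simp) y ((PySem.List.mem_sorted _ _ _ _).1 hy)
          exact ltB_of_gt (by rw [hk]; exact hplt)
        have hrec := ih (List.pairwise_cons.1 hpw).2
          (fun q hq => hkey q (by simp [hq])) (fun q hq => hg q (by simp [hq])) hmem'
        simp only [List.map_cons, flatG, List.flatMap_cons]
        simp only [flatG] at hrec
        rw [insertBy_append_left _ _ _ _ hskip, hrec, if_neg (by simpa using hpk)]

theorem sort_bboxes_as_flatG (bboxes : List (List Int)) (t : Int) :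
    sort_bboxes bboxes t =
      flatG (PySem.List.sorted
        (bboxes.foldl (fun d block => sb_group d t block) PySem.Dict.empty).items
        (fun p => p.1) false) := by
  unfold sort_bboxes flatG
  rw [PySem.List.foldl_append_eq_flatMap]
  simp

theorem sort_bboxes_eq_alt (bboxes : List (List Int)) (t : Int) :
    sort_bboxes bboxes t = sort_bboxes_alt bboxes t := by
  induction bboxes using List.reverseRecOn with
  | nil => rfl
  | append_singleton xs x ih =>
      obtain ⟨hnd, hitems⟩ := invD_fold xs t
      set d := xs.foldl (fun d block => sb_group d t block) PySem.Dict.empty with hd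
      have hndm : (d.items.map Prod.fst).Nodup := hnd
      have hpw := sorted_items_pairwise_lt d.items hndm
      have hkey : ∀ p ∈ PySem.List.sorted d.items (fun p => p.1) false, ∀ b ∈ p.2, gkey b t = p.1 :=
        fun p hp => hitems p ((PySem.List.mem_sorted _ _ _ _).1 hp)
      have hfold : (xs ++ [x]).foldl (fun d block => sb_group d t block) PySem.Dict.empty
          = sb_group d t x := by rw [List.foldl_append]; rfl
      rw [sort_bboxes_as_flatG, hfold, alt_eq_foldl, List.foldl_append, List.foldl_cons,
        List.foldl_nil, ← alt_eq_foldl, ← ih, sort_bboxes_as_flatG, ← hd]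
      unfold sb_group
      by_cases hc : d.contains (gkey x t) = true
      · -- existing group: items become a value-only map
        have hsome : (d.get? (gkey x t)).isSome := by
          rw [← PySem.Dict.contains_eq_isSome_get?]; exact hc
        obtain ⟨g, hv⟩ := Option.isSome_iff_exists.1 hsome
        have hgD : d.getD (gkey x t) [] = g := PySem.Dict.getD_of_get?_eq_some d [] hv
        have hgmem : (gkey x t, g) ∈ d.items := PySem.Dict.mem_items_of_get?_eq_some d hv
        have hg : ∀ p ∈ PySem.List.sorted d.items (fun p => p.1) false, p.1 = gkey x t → p.2 = g := by
          intro p hp hpk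
          have hpmem : (gkey x t, p.2) ∈ d.items := by
            have h1 := (PySem.List.mem_sorted _ _ _ _).1 hp
            have h2 : (p.1, p.2) ∈ d.items := by simpa using h1
            rwa [hpk] at h2
          have := PySem.Dict.getD_of_mem_items d hpmem hnd []
          rw [hgD] at this; exact this.symm
        have hmem : gkey x t ∈ (PySem.List.sorted d.items (fun p => p.1) false).map Prod.fst := by
          have hk : gkey x t ∈ d.items.map Prod.fst :=
            (PySem.Dict.contains_iff_mem_keys d _).1 hc
          exact (((PySem.List.sorted_perm d.items (fun p => p.1) false).map Prod.fst).mem_iff).2 hk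
        simp only [hc, if_true, hgD]
        rw [PySem.Dict.items_insert_of_contains d _ hc]
        have hmap := sorted_map_key_preserving
          (fun p : Int × List (List Int) => if (p.1 == gkey x t) = true then (gkey x t, g ++ [x]) else p)
          (fun p => p.1) (fun p => p.1)
          (fun a => by
            by_cases h : (a.1 == gkey x t) = true
            · simp [(eq_of_beq h).symm]
            · simp [h])
          d.items
        rw [hmap]
        exact flat_insert_existing t x g _ hpw hkey hg hmem
      · have hc' : d.contains (gkey x t) = false := by simpa using hc
        simp only [hc', Bool.false_eq_true, if_false]
        rw [PySem.Dict.getD_insert_self, PySem.Dict.insert_insert_self, List.nil_append,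
          PySem.Dict.items_insert_of_not_contains d _ hc', sorted_append_singleton]
        have hfresh : ∀ p ∈ PySem.List.sorted d.items (fun p => p.1) false, p.1 ≠ gkey x t := by
          intro p hp
          have hpmem := (PySem.List.mem_sorted _ _ _ _).1 hp
          intro hcontra
          have : gkey x t ∈ d.keys := by
            rw [← hcontra]
            exact List.mem_map_of_mem hpmem
          rw [← PySem.Dict.contains_iff_mem_keys] at this
          rw [this] at hc'; exact absurd hc' (by simp)
        exact flat_insert_fresh t x _ hpw hkey hfresh

-- ===== VERDICT (by name: the statement is the Claim_ definition above) =====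
theorem sort_bboxes_spec : Claim_equal_sort_bboxes := by
  intro bboxes tolerance _ _
  unfold Spec_sort_bboxes
  exact sort_bboxes_eq_alt bboxes tolerance
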